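-- pv_equiv track=rewrite | github.com/poflygogo/randomshit | 01zerojudge/01 基礎題庫/series_b/b557 直角三角形/v1-2.py | get_triangles_total
-- ===== SOURCE A (Python) =====
-- from collections import Counter
--
-- def get_triangles_total(lines: list) -> int:
--     lines_counter = Counter(lines)
--     lines_keys = sorted(lines_counter)
--     length = len(lines_keys)
--     result = 0
--     for i in range(length):
--         for j in range(i + 1, length):
--             for k in range(j + 1, length):
--                 check = (lines_keys[i], lines_keys[j], lines_keys[k])
--                 # 三角形定義: 兩條較短的邊長和必定大於最長的邊
--                 if check[0] + check[1] > check[2] and check[0] ** 2 + check[1] ** 2 == check[2] ** 2: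
--                     result += lines_counter[check[0]] * lines_counter[check[1]] * lines_counter[check[2]]
--     return result
-- ===== SOURCE B (Python) =====
-- from collections import Counter
--
-- def get_triangles_total(lines: list) -> int:
--     cnt = Counter(lines)
--     keys = sorted(cnt)
--     sq = {}
--     for v in keys:
--         if v > 0:
--             sq[v * v] = v
--     total = 0
--     for i, a in enumerate(keys):
--         for b in keys[i + 1:]:
--             c = sq.get(a * a + b * b)
--             if c is not None and c > b and a + b > c:
--                 total += cnt[a] * cnt[b] * cnt[c]
--     return total
-- ===== Notes on version B (the rewrite author's own statement) =====
-- stated objective: faster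
-- what changed: A scans all triples of distinct sorted values (cubic in the number of distinct values); B scans only pairs and finds the hypotenuse candidate by a single lookup in a precomputed square->side dictionary.
import Mathlib
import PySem

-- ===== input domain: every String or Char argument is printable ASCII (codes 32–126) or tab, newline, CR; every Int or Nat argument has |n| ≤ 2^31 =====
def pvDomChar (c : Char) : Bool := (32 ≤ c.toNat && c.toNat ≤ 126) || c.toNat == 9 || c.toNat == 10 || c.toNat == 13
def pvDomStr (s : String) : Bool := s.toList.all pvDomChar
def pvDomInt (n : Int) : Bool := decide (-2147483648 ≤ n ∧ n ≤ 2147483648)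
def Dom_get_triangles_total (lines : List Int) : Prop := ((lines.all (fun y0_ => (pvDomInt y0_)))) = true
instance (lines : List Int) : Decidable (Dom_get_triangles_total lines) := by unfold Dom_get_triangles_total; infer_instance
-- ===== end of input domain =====

-- B replaces A's cubic scan over key triples by a quadratic scan over key pairs with a
-- square→side dictionary lookup for the hypotenuse (objective: faster, asymptotic).

-- ===== PORT A =====
def get_triangles_total (lines : List Int) : Int :=
  let linesCounter := PySem.Dict.counter lines
  let linesKeys := PySem.List.sorted linesCounter.keys (fun x => x) false
  let length : Int := linesKeys.length
  (PySem.List.pyRange 0 length 1).foldl (fun result i =>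
    (PySem.List.pyRange (i + 1) length 1).foldl (fun result j =>
      (PySem.List.pyRange (j + 1) length 1).foldl (fun result k =>
        let check := (PySem.List.pyGetD linesKeys i 0, PySem.List.pyGetD linesKeys j 0,
          PySem.List.pyGetD linesKeys k 0)
        if check.1 + check.2.1 > check.2.2 ∧ check.1 ^ 2 + check.2.1 ^ 2 = check.2.2 ^ 2 then
          result + linesCounter.getD check.1 0 * linesCounter.getD check.2.1 0 *
            linesCounter.getD check.2.2 0
        else result) result) result) 0

-- ===== PORT B =====
def get_triangles_total_alt (lines : List Int) : Int :=
  let cnt := PySem.Dict.counter lines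
  let keys := PySem.List.sorted cnt.keys (fun x => x) false
  let sq := keys.foldl (fun d v => if v > 0 then d.insert (v * v) v else d) PySem.Dict.empty
  (PySem.List.enumerate keys 0).foldl (fun total p =>
    (PySem.List.slice keys (some (p.1 + 1)) none).foldl (fun total b =>
      match sq.get? (p.2 * p.2 + b * b) with
      | some c => if c > b ∧ p.2 + b > c then
          total + cnt.getD p.2 0 * cnt.getD b 0 * cnt.getD c 0 else total
      | none => total) total) 0

-- ===== PRECONDITION & SPEC =====
def Spec_get_triangles_total (lines : List Int) (out : Int) : Prop := out = get_triangles_total_alt lines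
instance (lines : List Int) (out : Int) : Decidable (Spec_get_triangles_total lines out) := by unfold Spec_get_triangles_total; infer_instance

-- ===== CLAIM (what is proved, stated in full; the proofs are below) =====
def Claim_equal_get_triangles_total : Prop := ∀ (lines : List Int), Dom_get_triangles_total lines → Spec_get_triangles_total lines (get_triangles_total lines)

-- ===== LEMMAS AND PROOFS =====

-- the value B adds for the pair (a, b) given the dictionary-lookup result o
def pvOptTerm (m : Int → Int) (a b : Int) (o : Option Int) : Int :=
  match o with
  | some c => if c > b ∧ a + b > c then m a * m b * m c else 0
  | none => 0

theorem pvMatch_split (m : Int → Int) (a b t : Int) (o : Option Int) :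
    (match o with
     | some c => if c > b ∧ a + b > c then t + m a * m b * m c else t
     | none => t) = t + pvOptTerm m a b o := by
  cases o with
  | none => simp [pvOptTerm]
  | some c => simp only [pvOptTerm]; split_ifs <;> simp

-- characterization of the square→side dictionary B builds
theorem pvSq_get (keys : List Int) (hnd : keys.Nodup) (s c : Int) :
    (keys.foldl (fun d v => if v > 0 then d.insert (v * v) v else d)
      PySem.Dict.empty).get? s = some c ↔ (c ∈ keys ∧ 0 < c ∧ c * c = s) := by
  induction keys using List.reverseRecOn with
  | nil => simp [PySem.Dict.get?_empty]
  | append_singleton l x ih =>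
      rw [List.foldl_append] at *
      have hnl : l.Nodup := (List.nodup_append.mp hnd).1
      have hxl : x ∉ l := by
        have := List.nodup_append.mp hnd
        intro hx; exact this.2.2 x hx x (List.mem_singleton.mpr rfl) rfl
      simp only [List.foldl_cons, List.foldl_nil]
      by_cases hx : x > 0
      · rw [if_pos hx, PySem.Dict.get?_insert]
        by_cases hs : s = x * x
        · rw [if_pos hs]
          constructor
          · rintro h; injection h with h; subst h
            exact ⟨List.mem_append.mpr (Or.inr (List.mem_singleton.mpr rfl)), hx, hs.symm⟩
          · rintro ⟨hc, hc0, hcc⟩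
            have : c = x := by nlinarith [hcc, hs]
            simp [this]
        · rw [if_neg hs, ih hnl]
          constructor
          · rintro ⟨h1, h2, h3⟩; exact ⟨List.mem_append.mpr (Or.inl h1), h2, h3⟩
          · rintro ⟨h1, h2, h3⟩
            rcases List.mem_append.mp h1 with h | h
            · exact ⟨h, h2, h3⟩
            · exact absurd (h3 ▸ congrArg (fun y => y * y) (List.mem_singleton.mp h)) (fun e => hs (by rw [← h3, List.mem_singleton.mp h]))
      · rw [if_neg hx, ih hnl]
        constructor
        · rintro ⟨h1, h2, h3⟩; exact ⟨List.mem_append.mpr (Or.inl h1), h2, h3⟩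
        · rintro ⟨h1, h2, h3⟩
          rcases List.mem_append.mp h1 with h | h
          · exact ⟨h, h2, h3⟩
          · exact absurd (List.mem_singleton.mp h ▸ h2) (by rw [List.mem_singleton.mp h] at h2; exact fun _ => hx h2)

theorem pvFilter_singleton {p : Int → Bool} (l : List Int) (hnd : l.Nodup) (k0 : Int)
    (hk : k0 ∈ l) (hp : ∀ k ∈ l, p k = true ↔ k = k0) : l.filter p = [k0] := by
  induction l with
  | nil => cases hk
  | cons a t ih =>
      have hnd' := (List.nodup_cons.mp hnd)
      by_cases ha : a = k0
      · subst ha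
        have : t.filter p = [] := by
          rw [List.filter_eq_nil_iff]
          intro k hkt hpk
          exact hnd'.1 (((hp k (List.mem_cons_of_mem _ hkt)).mp hpk) ▸ hkt)
        simp [(hp a (List.mem_cons_self)).mpr rfl, this]
      · have hpa : p a = false := by
          rcases Bool.eq_false_or_eq_true (p a) with h | h
          · exact absurd ((hp a List.mem_cons_self).mp h) ha
          · exact h
        have hk0t : k0 ∈ t := by rcases List.mem_cons.mp hk with h | h; exact absurd h.symm ha; exact h
        simp [hpa,
          ih hnd'.2 hk0t (fun k hkt => hp k (List.mem_cons_of_mem _ hkt))]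

-- the heart: for a pair of indices i < j, A's innermost scan equals B's dictionary lookup
theorem pvInner_eq (keys : List Int) (m : Int → Int)
    (hnd : keys.Nodup) (hpw : keys.Pairwise (· < ·))
    (i j : Int) (hi : 0 ≤ i) (hij : i < j) (hj : j < (keys.length : Int)) :
    (((PySem.List.pyRange (j + 1) (keys.length : Int) 1).filter (fun k =>
        decide (PySem.List.pyGetD keys i 0 + PySem.List.pyGetD keys j 0 > PySem.List.pyGetD keys k 0 ∧
          PySem.List.pyGetD keys i 0 ^ 2 + PySem.List.pyGetD keys j 0 ^ 2 = PySem.List.pyGetD keys k 0 ^ 2))).map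
      (fun k => m (PySem.List.pyGetD keys i 0) * m (PySem.List.pyGetD keys j 0) * m (PySem.List.pyGetD keys k 0))).sum
    = pvOptTerm m (PySem.List.pyGetD keys i 0) (PySem.List.pyGetD keys j 0)
        ((keys.foldl (fun d v => if v > 0 then d.insert (v * v) v else d)
          PySem.Dict.empty).get? (PySem.List.pyGetD keys i 0 * PySem.List.pyGetD keys i 0 +
            PySem.List.pyGetD keys j 0 * PySem.List.pyGetD keys j 0)) := by
  have hmono : ∀ (p q : Nat) (hq : q < keys.length) (hpq : p < q),
      keys[p]'(by omega) < keys[q]'hq := by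
    intro p q hq hpq
    exact List.pairwise_iff_getElem.mp hpw p q (by omega) hq hpq
  set a := PySem.List.pyGetD keys i 0 with ha'
  set b := PySem.List.pyGetD keys j 0 with hb'
  have ha : a = keys[i.toNat]'(by omega) := PySem.List.pyGetD_eq_getElem keys 0 hi (by omega)
  have hb : b = keys[j.toNat]'(by omega) := PySem.List.pyGetD_eq_getElem keys 0 (by omega) hj
  have hab : a < b := by rw [ha, hb]; exact hmono _ _ (by omega) (by omega)
  have hck : ∀ (k : Int) (hk : k ∈ PySem.List.pyRange (j + 1) (keys.length : Int) 1),
      PySem.List.pyGetD keys k 0 = keys[k.toNat]'(by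
        have := PySem.List.mem_pyRange_one.mp hk; omega) := by
    intro k hk
    have hkb := PySem.List.mem_pyRange_one.mp hk
    exact PySem.List.pyGetD_eq_getElem keys 0 (by omega) (by omega)
  -- any index passing A's test carries the positive hypotenuse of (a, b)
  have hP : ∀ k ∈ PySem.List.pyRange (j + 1) (keys.length : Int) 1,
      (a + b > PySem.List.pyGetD keys k 0 ∧ a ^ 2 + b ^ 2 = PySem.List.pyGetD keys k 0 ^ 2) →
      b < PySem.List.pyGetD keys k 0 ∧ 0 < PySem.List.pyGetD keys k 0 ∧
        PySem.List.pyGetD keys k 0 * PySem.List.pyGetD keys k 0 = a * a + b * b := by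
    intro k hk hPk
    have hkb := PySem.List.mem_pyRange_one.mp hk
    obtain ⟨h1, h2⟩ := hPk
    rw [hck k hk] at h1 h2 ⊢
    have hbc : b < keys[k.toNat]'(by omega) := by
      rw [hb]; exact hmono _ _ (by omega) (by omega)
    have hsq : keys[k.toNat]'(by omega) * keys[k.toNat]'(by omega) = a * a + b * b := by
      have := h2; ring_nf at this ⊢; nlinarith [this]
    refine ⟨hbc, ?_, hsq⟩
    by_contra hle
    push Not at hle
    nlinarith [hab, hbc, hsq]
  rcases hget : (keys.foldl (fun d v => if v > 0 then d.insert (v * v) v else d)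
      PySem.Dict.empty).get? (a * a + b * b) with _ | c
  · -- none: no index can pass the test
    have : (PySem.List.pyRange (j + 1) (keys.length : Int) 1).filter (fun k =>
        decide (a + b > PySem.List.pyGetD keys k 0 ∧
          a ^ 2 + b ^ 2 = PySem.List.pyGetD keys k 0 ^ 2)) = [] := by
      rw [List.filter_eq_nil_iff]
      intro k hk hdec
      have hPk := of_decide_eq_true hdec
      obtain ⟨hbc, hc0, hsq⟩ := hP k hk hPk
      have hmem : PySem.List.pyGetD keys k 0 ∈ keys := by
        rw [hck k hk]; exact List.getElem_mem _
      have := (pvSq_get keys hnd (a * a + b * b) _).mpr ⟨hmem, hc0, hsq⟩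
      rw [hget] at this; cases this
    rw [this]; simp [pvOptTerm]
  · have ⟨hcmem, hc0, hcc⟩ := (pvSq_get keys hnd (a * a + b * b) c).mp hget
    obtain ⟨kN, hkN, hkeq⟩ := List.mem_iff_getElem.mp hcmem
    by_cases hQ : c > b ∧ a + b > c
    · -- the unique witness index
      have hjk : j.toNat < kN := by
        by_contra hle
        push Not at hle
        have : keys[kN] ≤ keys[j.toNat]'(by omega) := by
          rcases Nat.lt_or_ge kN j.toNat with h | h
          · exact le_of_lt (hmono _ _ (by omega) h)
          · have : kN = j.toNat := by omega
            subst this; exact le_refl _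
        rw [hkeq, ← hb] at this; omega
      have hk0mem : (kN : Int) ∈ PySem.List.pyRange (j + 1) (keys.length : Int) 1 :=
        PySem.List.mem_pyRange_one.mpr ⟨by omega, by omega⟩
      have hgk0 : PySem.List.pyGetD keys (kN : Int) 0 = c := by
        rw [hck _ hk0mem]; simpa using hkeq
      have hfilter : (PySem.List.pyRange (j + 1) (keys.length : Int) 1).filter (fun k =>
          decide (a + b > PySem.List.pyGetD keys k 0 ∧
            a ^ 2 + b ^ 2 = PySem.List.pyGetD keys k 0 ^ 2)) = [(kN : Int)] := by
        apply pvFilter_singleton _ (PySem.List.nodup_pyRange_one _ _) _ hk0mem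
        intro k hk
        have hkb := PySem.List.mem_pyRange_one.mp hk
        constructor
        · intro hdec
          have hPk := of_decide_eq_true hdec
          obtain ⟨hbc, hck0, hsq⟩ := hP k hk hPk
          have hceq : PySem.List.pyGetD keys k 0 = c := by nlinarith [hsq, hcc, hck0, hc0]
          rw [hck k hk] at hceq
          have : k.toNat = kN := by
            rw [← hkeq] at hceq
            exact (List.Nodup.getElem_inj_iff hnd).mp hceq
          omega
        · intro hkk
          subst hkk
          rw [hgk0]
          apply decide_eq_true
          constructor
          · exact hQ.2
          · have : a ^ 2 + b ^ 2 = a * a + b * b := by ring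
            rw [this, ← hcc]; ring
      rw [hfilter]
      simp only [List.map_cons, List.map_nil, List.sum_cons, List.sum_nil, add_zero]
      rw [hgk0]
      simp [pvOptTerm, hQ]
    · -- c fails B's test: no index passes A's either
      have : (PySem.List.pyRange (j + 1) (keys.length : Int) 1).filter (fun k =>
          decide (a + b > PySem.List.pyGetD keys k 0 ∧
            a ^ 2 + b ^ 2 = PySem.List.pyGetD keys k 0 ^ 2)) = [] := by
        rw [List.filter_eq_nil_iff]
        intro k hk hdec
        have hPk := of_decide_eq_true hdec
        obtain ⟨hbc, hck0, hsq⟩ := hP k hk hPk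
        have hmem : PySem.List.pyGetD keys k 0 ∈ keys := by
          rw [hck k hk]; exact List.getElem_mem _
        have hsome := (pvSq_get keys hnd (a * a + b * b) _).mpr ⟨hmem, hck0, hsq⟩
        rw [hget] at hsome
        injection hsome with hce
        exact hQ ⟨hce ▸ hbc, hce ▸ hPk.1⟩
      rw [this]
      simp [pvOptTerm, hQ]

theorem pvMain (keys : List Int) (m : Int → Int)
    (hnd : keys.Nodup) (hpw : keys.Pairwise (· < ·)) :
    (PySem.List.pyRange 0 (keys.length : Int) 1).foldl (fun result i =>
      (PySem.List.pyRange (i + 1) (keys.length : Int) 1).foldl (fun result j =>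
        (PySem.List.pyRange (j + 1) (keys.length : Int) 1).foldl (fun result k =>
          if PySem.List.pyGetD keys i 0 + PySem.List.pyGetD keys j 0 > PySem.List.pyGetD keys k 0 ∧
             PySem.List.pyGetD keys i 0 ^ 2 + PySem.List.pyGetD keys j 0 ^ 2 = PySem.List.pyGetD keys k 0 ^ 2 then
            result + m (PySem.List.pyGetD keys i 0) * m (PySem.List.pyGetD keys j 0) *
              m (PySem.List.pyGetD keys k 0)
          else result) result) result) 0
    =
    (PySem.List.enumerate keys 0).foldl (fun total p =>
      (PySem.List.slice keys (some (p.1 + 1)) none).foldl (fun total b =>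
        match (keys.foldl (fun d v => if v > 0 then d.insert (v * v) v else d)
            PySem.Dict.empty).get? (p.2 * p.2 + b * b) with
        | some c => if c > b ∧ p.2 + b > c then total + m p.2 * m b * m c else total
        | none => total) total) 0 := by
  rw [PySem.List.enumerate_eq_map_pyRange keys 0, List.foldl_map]
  simp only [PySem.List.len_eq]
  have hcongr : ∀ (acc : Int), ∀ i ∈ PySem.List.pyRange 0 (keys.length : Int) 1,
      (List.foldl
          (fun total b =>
            match
              (List.foldl (fun d v => if v > 0 then d.insert (v * v) v else d) PySem.Dict.empty keys).get?
                (PySem.List.pyGetD keys i 0 * PySem.List.pyGetD keys i 0 + b * b) with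
            | some c =>
              if c > b ∧ PySem.List.pyGetD keys i 0 + b > c then total + m (PySem.List.pyGetD keys i 0) * m b * m c
              else total
            | none => total)
          acc (PySem.List.slice keys (some (i + 1)))) =
      acc + ((PySem.List.pyRange (i + 1) (keys.length : Int) 1).map (fun j =>
        pvOptTerm m (PySem.List.pyGetD keys i 0) (PySem.List.pyGetD keys j 0)
          ((keys.foldl (fun d v => if v > 0 then d.insert (v * v) v else d)
            PySem.Dict.empty).get? (PySem.List.pyGetD keys i 0 * PySem.List.pyGetD keys i 0 +
              PySem.List.pyGetD keys j 0 * PySem.List.pyGetD keys j 0)))).sum := by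
    intro acc i hi
    have hi0 : 0 ≤ i := (PySem.List.mem_pyRange_one.mp hi).1
    rw [show some (i + 1) = some (((i + 1).toNat : Int)) from by rw [Int.toNat_of_nonneg (by omega)]]
    rw [PySem.List.slice_from_natCast]
    rw [← PySem.List.foldl_pyRange_pyGetD keys 0 _ acc (a := i + 1) (by omega)]
    rw [PySem.List.len_eq]
    rw [PySem.List.foldl_congr_mem _ _
      (fun acc j => acc + pvOptTerm m (PySem.List.pyGetD keys i 0) (PySem.List.pyGetD keys j 0)
        ((keys.foldl (fun d v => if v > 0 then d.insert (v * v) v else d)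
          PySem.Dict.empty).get? (PySem.List.pyGetD keys i 0 * PySem.List.pyGetD keys i 0 +
            PySem.List.pyGetD keys j 0 * PySem.List.pyGetD keys j 0))) acc
      (fun acc2 j _ => pvMatch_split m (PySem.List.pyGetD keys i 0) (PySem.List.pyGetD keys j 0) acc2 _)]
    rw [PySem.List.foldl_add]
  conv_rhs => rw [PySem.List.foldl_congr_mem _ _ _ 0 hcongr, PySem.List.foldl_add]
  conv_lhs => simp only [PySem.List.foldl_ite_eq_foldl_filter, PySem.List.foldl_add]
  rw [zero_add, zero_add]
  apply congrArg List.sum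
  apply List.map_congr_left
  intro i hi
  apply congrArg List.sum
  apply List.map_congr_left
  intro j hj
  have hib := PySem.List.mem_pyRange_one.mp hi
  have hjb := PySem.List.mem_pyRange_one.mp hj
  exact pvInner_eq keys m hnd hpw i j hib.1 (by omega) hjb.2

-- ===== VERDICT (by name: the statement is the Claim_ definition above) =====
theorem get_triangles_total_spec : Claim_equal_get_triangles_total := by
  intro lines _
  unfold Spec_get_triangles_total get_triangles_total get_triangles_total_alt
  have hnd : (PySem.List.sorted (PySem.Dict.counter lines).keys (fun x => x) false).Nodup :=
    (PySem.List.sorted_perm _ _ _).symm.nodup (PySem.Dict.nodup_keys_counter lines)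
  have hle : (PySem.List.sorted (PySem.Dict.counter lines).keys (fun x => x) false).Pairwise (· ≤ ·) :=
    PySem.List.sorted_pairwise _ _
  have hpw : (PySem.List.sorted (PySem.Dict.counter lines).keys (fun x => x) false).Pairwise (· < ·) := by
    have := hle.and hnd
    exact this.imp (fun h => lt_of_le_of_ne h.1 h.2)
  exact pvMain _ (fun v => (PySem.Dict.counter lines).getD v 0) hnd hpw
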